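-- pv_equiv track=rewrite | github.com/SainsburyWellcomeCentre/rc2_analysis | python/src/rc2_glm/pipeline.py | _vars_from_names_for_model
-- ===== SOURCE A (Python) =====
-- def _vars_from_names_for_model(
--     model_label: str, train_names: list[str]
-- ) -> list[str]:
--     """Variables present on the design columns of ``train_names``.
--
--     Mirrors ``plots._vars_from_names`` and ``plots`` model_vars dict but
--     avoids importing those private helpers here.
--     """
--     vars_present: list[str] = []
--     for prefix in ("Speed", "TF", "SF", "OR",
--                    "Speed_x_TF", "Speed_x_SF", "Speed_x_OR",
--                    "TF_x_SF", "TF_x_OR", "SF_x_OR"):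
--         if any(n.startswith(prefix + "_") or n == prefix for n in train_names):
--             vars_present.append(prefix)
--     return vars_present
-- ===== SOURCE B (Python) =====
-- PREFIXES = ("Speed", "TF", "SF", "OR",
--             "Speed_x_TF", "Speed_x_SF", "Speed_x_OR",
--             "TF_x_SF", "TF_x_OR", "SF_x_OR")
-- PREFIX_SET = set(PREFIXES)
--
--
-- def _vars_from_names_for_model(model_label, train_names):
--     # A name n matches prefix p iff n == p or n startswith p + "_", i.e. iff p is an
--     # underscore-cut of n (n itself, or n[:i] where n[i] == "_").  So derive the
--     # candidate cuts from each name and intersect with the fixed prefix set.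
--     present = set()
--     for n in train_names:
--         for cand in [n] + [n[:i] for i, c in enumerate(n) if c == "_"]:
--             if cand in PREFIX_SET:
--                 present.add(cand)
--     return [p for p in PREFIXES if p in present]
-- ===== Notes on version B (the rewrite author's own statement) =====
-- stated objective: alternative
-- what changed: B never tests prefixes against names: for each name it derives the candidate underscore-cut prefixes (the name itself and every n[:i] with n[i]=='_') and intersects them with the fixed prefix set, then filters the canonical prefix tuple by the collected set; A instead scans the whole name list once per prefix with startswith tests.
import Mathlib
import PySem

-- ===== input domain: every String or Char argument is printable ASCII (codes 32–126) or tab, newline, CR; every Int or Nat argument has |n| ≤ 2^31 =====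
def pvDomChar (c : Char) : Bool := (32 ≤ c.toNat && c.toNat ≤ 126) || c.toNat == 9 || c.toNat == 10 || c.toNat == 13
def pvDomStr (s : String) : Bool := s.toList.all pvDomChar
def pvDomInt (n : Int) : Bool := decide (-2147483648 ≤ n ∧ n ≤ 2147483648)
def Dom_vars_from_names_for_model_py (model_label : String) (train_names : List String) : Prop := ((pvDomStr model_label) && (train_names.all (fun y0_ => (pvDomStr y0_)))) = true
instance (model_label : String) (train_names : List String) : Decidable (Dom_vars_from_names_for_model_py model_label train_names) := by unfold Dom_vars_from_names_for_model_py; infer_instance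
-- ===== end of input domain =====

-- B derives each name's underscore-cut candidate prefixes in one pass and intersects with the
-- fixed prefix set, instead of A's per-prefix startswith scans; objective: alternative.


def pvPrefixes : List String :=
  ["Speed", "TF", "SF", "OR",
   "Speed_x_TF", "Speed_x_SF", "Speed_x_OR",
   "TF_x_SF", "TF_x_OR", "SF_x_OR"]

-- ===== PORT A =====
def vars_from_names_for_model_py (model_label : String) (train_names : List String) : List String :=
  pvPrefixes.foldl
    (fun vars_present prefix_ =>
      if train_names.any (fun n => PySem.Str.startswith n (prefix_ ++ "_") || n == prefix_)
      then vars_present ++ [prefix_] else vars_present)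
    []

-- ===== PORT B =====
-- [n] + [n[:i] for i, c in enumerate(n) if c == "_"]
-- (n[:i] with the nonnegative index i from enumerate is exactly take i)
def pvCandidates (n : String) : List String :=
  n :: (PySem.List.enumerate n.toList).filterMap
        (fun ic => if ic.2 == '_' then some (String.ofList (n.toList.take ic.1.toNat)) else none)

def vars_from_names_for_model_py_alt (model_label : String) (train_names : List String) : List String :=
  let present : PySem.Set String :=
    train_names.foldl
      (fun s n =>
        (pvCandidates n).foldl
          (fun s c => if pvPrefixes.contains c then PySem.Set.add s c else s)
          s)
      PySem.Set.empty
  pvPrefixes.filter (fun p => PySem.Set.contains present p)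

-- ===== PRECONDITION & SPEC =====
def Spec_vars_from_names_for_model_py (model_label : String) (train_names : List String) (out : List String) : Prop := out = vars_from_names_for_model_py_alt model_label train_names
instance (model_label : String) (train_names : List String) (out : List String) : Decidable (Spec_vars_from_names_for_model_py model_label train_names out) := by unfold Spec_vars_from_names_for_model_py; infer_instance

-- ===== CLAIM (what is proved, stated in full; the proofs are below) =====
def Claim_equal_vars_from_names_for_model_py : Prop := ∀ (model_label : String) (train_names : List String), Dom_vars_from_names_for_model_py model_label train_names → Spec_vars_from_names_for_model_py model_label train_names (vars_from_names_for_model_py model_label train_names)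

-- ===== LEMMAS AND PROOFS =====

-- ps ++ ['_'] is a prefix of cs iff cs has an underscore at position ps.length cutting off ps
theorem pv_prefix_underscore_iff (ps cs : List Char) :
    (ps ++ ['_']) <+: cs ↔ ∃ k, k < cs.length ∧ cs[k]? = some '_' ∧ cs.take k = ps := by
  constructor
  · rintro ⟨t, rfl⟩
    refine ⟨ps.length, by simp, ?_, ?_⟩
    · rw [List.append_assoc, List.singleton_append, List.getElem?_append_right (le_refl _)]
      simp
    · simp
  · rintro ⟨k, hk, hu, rfl⟩
    refine ⟨cs.drop (k + 1), ?_⟩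
    have hdrop : cs.drop k = cs[k] :: cs.drop (k + 1) := List.drop_eq_getElem_cons hk
    have : cs[k] = '_' := by
      have := List.getElem?_eq_getElem hk
      rw [this] at hu; exact Option.some.inj hu
    rw [List.append_assoc, List.singleton_append, ← this, ← hdrop, List.take_append_drop]

-- membership in the candidate list = the match condition of A
theorem pv_mem_candidates (n p : String) :
    p ∈ pvCandidates n ↔
      (PySem.Str.startswith n (p ++ "_") || n == p) = true := by
  simp only [pvCandidates, List.mem_cons, List.mem_filterMap, Bool.or_eq_true, beq_iff_eq,
    PySem.Str.startswith_eq, PySem.Chars.startswith_iff]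
  have htl : (p ++ "_").toList = p.toList ++ ['_'] := by
    simp [String.toList_append]
  rw [htl, pv_prefix_underscore_iff]
  constructor
  · rintro (rfl | ⟨⟨i, c⟩, hmem, hc⟩)
    · right; rfl
    · rcases (PySem.List.mem_enumerate_iff _ _ _).mp hmem with ⟨k, hk, hp⟩
      rw [Prod.mk.injEq] at hp
      obtain ⟨rfl, rfl⟩ := hp
      left
      split at hc
      · rename_i hund
        refine ⟨k, hk, ?_, ?_⟩
        · rw [List.getElem?_eq_getElem hk]
          exact congrArg some (by simpa using hund)
        · have h := Option.some.inj hc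
          rw [← h]
          simp
      · exact absurd hc (by simp)
  · rintro (⟨k, hk, hu, hps⟩ | rfl)
    · right
      have hgk : n.toList[k] = '_' := by
        have h := List.getElem?_eq_getElem hk
        rw [h] at hu; exact Option.some.inj hu
      refine ⟨((0 : Int) + k, n.toList[k]),
        (PySem.List.mem_enumerate_iff _ _ _).mpr ⟨k, hk, rfl⟩, ?_⟩
      rw [hgk]
      simp [hps]
    · left; rfl

-- membership in the inner fold (adding every prefix-set candidate of one name)
theorem pv_mem_inner (L : List String) (c : String → Bool) (s : List String) (p : String) :
    p ∈ L.foldl (fun s q => if c q then PySem.Set.add s q else s) s ↔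
      p ∈ s ∨ (p ∈ L ∧ c p = true) := by
  induction L generalizing s with
  | nil => simp
  | cons q L ih =>
    simp only [List.foldl_cons, ih]
    by_cases hq : c q = true
    · simp only [hq, if_pos, PySem.Set.mem_add, List.mem_cons]
      constructor
      · rintro ((h | rfl) | h)
        · exact Or.inl h
        · exact Or.inr ⟨Or.inl rfl, hq⟩
        · exact Or.inr ⟨Or.inr h.1, h.2⟩
      · rintro (h | ⟨(rfl | h), hc⟩)
        · exact Or.inl (Or.inl h)
        · exact Or.inl (Or.inr rfl)
        · exact Or.inr ⟨h, hc⟩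
    · simp only [hq, if_neg, Bool.not_eq_true, List.mem_cons]
      constructor
      · rintro (h | h)
        · exact Or.inl h
        · exact Or.inr ⟨Or.inr h.1, h.2⟩
      · rintro (h | ⟨(rfl | h), hc⟩)
        · exact Or.inl h
        · exact absurd hc hq
        · exact Or.inr ⟨h, hc⟩

-- membership in the outer fold over train_names
theorem pv_mem_outer (ns : List String) (s : List String) (p : String) :
    p ∈ ns.foldl
        (fun s n => (pvCandidates n).foldl
          (fun s q => if pvPrefixes.contains q then PySem.Set.add s q else s) s)
        s ↔
      p ∈ s ∨ (pvPrefixes.contains p = true ∧ ∃ n ∈ ns, p ∈ pvCandidates n) := by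
  induction ns generalizing s with
  | nil => simp
  | cons n ns ih =>
    simp only [List.foldl_cons, ih, pv_mem_inner]
    constructor
    · rintro ((h | h) | h)
      · exact Or.inl h
      · exact Or.inr ⟨h.2, n, List.mem_cons_self, h.1⟩
      · rcases h with ⟨hp, m, hm, hc⟩
        exact Or.inr ⟨hp, m, List.mem_cons_of_mem _ hm, hc⟩
    · rintro (h | ⟨hp, m, hm, hc⟩)
      · exact Or.inl (Or.inl h)
      · rcases List.mem_cons.mp hm with rfl | hm
        · exact Or.inl (Or.inr ⟨hc, hp⟩)
        · exact Or.inr ⟨hp, m, hm, hc⟩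

-- ===== VERDICT (by name: the statement is the Claim_ definition above) =====
theorem vars_from_names_for_model_py_spec : Claim_equal_vars_from_names_for_model_py := by
  intro model_label train_names _
  unfold Spec_vars_from_names_for_model_py vars_from_names_for_model_py vars_from_names_for_model_py_alt
  rw [PySem.List.foldl_append_if_eq_filter]
  simp only [List.nil_append]
  apply List.filter_congr
  intro p hp
  rw [Bool.eq_iff_iff, List.any_eq_true, PySem.Set.contains_iff, pv_mem_outer]
  constructor
  · rintro ⟨n, hn, hc⟩
    exact Or.inr ⟨List.contains_iff_mem.mpr hp, n, hn, (pv_mem_candidates n p).mpr hc⟩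
  · rintro (h | ⟨_, n, hn, hc⟩)
    · simp at h
    · exact ⟨n, hn, (pv_mem_candidates n p).mp hc⟩
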